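-- pv_equiv track=rewrite | github.com/prrraveen/Elements_of_programming_interview | epi_judge_python/picking_up_coins.py | maximum_revenue
-- ===== SOURCE A (Python) =====
-- from typing import List
--
-- def maximum_revenue(coins: List[int]) -> int:
--     def f(a, b):
--         if a > b:
--             return 0
--         if maximum_revenue_for_range[a][b] == 0:
--             max_revenu_a = coins[a] + min(f(a + 1, b - 1), f(a + 2, b))
--             max_revenu_b = coins[b] + min(f(a + 1, b - 1), f(a, b - 2))
--             maximum_revenue_for_range[a][b] = max(max_revenu_a, max_revenu_b)
--         return maximum_revenue_for_range[a][b]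
--     maximum_revenue_for_range = [[0] * len(coins) for _ in coins]
--     return f(a=0, b=len(coins) - 1)
-- ===== SOURCE B (Python) =====
-- from typing import List
--
-- def maximum_revenue(coins: List[int]) -> int:
--     n = len(coins)
--     if n == 0:
--         return 0
--     dp = [[0] * n for _ in range(n)]
--     def get(a, b):
--         return dp[a][b] if a <= b else 0
--     for L in range(n):
--         for a in range(n - L):
--             b = a + L
--             inner = get(a + 1, b - 1)
--             ra = coins[a] + min(inner, get(a + 2, b))
--             rb = coins[b] + min(inner, get(a, b - 2))
--             dp[a][b] = max(ra, rb)
--     return dp[0][n - 1]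
-- ===== Notes on version B (the rewrite author's own statement) =====
-- stated objective: alternative
-- what changed: Replaced A's memoized top-down recursion (with a 0-sentinel memo table) by an iterative bottom-up tabulation over increasing interval lengths.
import Mathlib
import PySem

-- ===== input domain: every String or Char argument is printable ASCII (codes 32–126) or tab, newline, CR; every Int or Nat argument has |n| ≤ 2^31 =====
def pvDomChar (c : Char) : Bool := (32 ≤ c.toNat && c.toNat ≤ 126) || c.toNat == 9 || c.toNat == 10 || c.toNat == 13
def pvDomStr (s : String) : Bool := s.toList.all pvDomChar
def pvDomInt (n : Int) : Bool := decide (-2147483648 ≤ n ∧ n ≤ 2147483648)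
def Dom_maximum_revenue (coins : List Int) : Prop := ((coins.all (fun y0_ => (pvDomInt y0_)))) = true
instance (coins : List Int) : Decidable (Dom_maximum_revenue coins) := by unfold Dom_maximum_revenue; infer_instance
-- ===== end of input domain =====

-- B replaces A's memoized top-down recursion by bottom-up tabulation over interval lengths (objective: alternative, same O(n^2) work without recursion/memo-sentinel).

-- 2D-table primitives shared by both ports: t[x][y] read with default and t[x][y] = v write,
-- exactly Python's nested list indexing/assignment (both programs use the same n×n list of lists).
def tGet (t : List (List Int)) (x y : Int) : Int :=
  PySem.List.pyGetD (PySem.List.pyGetD t x []) y 0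

def tSet (t : List (List Int)) (x y : Int) (v : Int) : List (List Int) :=
  PySem.List.pySetD t x (PySem.List.pySetD (PySem.List.pyGetD t x []) y v)

-- ===== PORT A =====
-- A's nested function f with the mutable memo list threaded through; the `== 0` sentinel test and
-- the order of the four recursive calls are kept exactly.  The Nat fuel is a totality guard only:
-- it starts at len(coins)+1 ≥ (b - a + 2) and each call decreases the gap by 2, so 0 is never hit.
-- coins[a]/coins[b] are only read with 0 ≤ a ≤ b < len coins, so pyGetD with default 0 is exact.
def fA (coins : List Int) (fuel : Nat) (a b : Int) (memo : List (List Int)) :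
    Int × List (List Int) :=
  match fuel with
  | 0 => (0, memo)
  | fuel + 1 =>
    if a > b then (0, memo)
    else if tGet memo a b = 0 then
      let p1 := fA coins fuel (a + 1) (b - 1) memo
      let p2 := fA coins fuel (a + 2) b p1.2
      let maxRevA := PySem.List.pyGetD coins a 0 + min p1.1 p2.1
      let p3 := fA coins fuel (a + 1) (b - 1) p2.2
      let p4 := fA coins fuel a (b - 2) p3.2
      let maxRevB := PySem.List.pyGetD coins b 0 + min p3.1 p4.1
      let r := max maxRevA maxRevB
      (r, tSet p4.2 a b r)
    else (tGet memo a b, memo)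

def maximum_revenue (coins : List Int) : Int :=
  (fA coins (PySem.List.len coins + 1).toNat 0 (PySem.List.len coins - 1)
    (coins.map (fun _ => List.replicate (PySem.List.len coins).toNat 0))).1

-- ===== PORT B =====
def bGet (dp : List (List Int)) (a b : Int) : Int :=
  if a ≤ b then tGet dp a b else 0

def bStep (coins : List Int) (L : Int) (dp : List (List Int)) (a : Int) : List (List Int) :=
  let b := a + L
  let inner := bGet dp (a + 1) (b - 1)
  let ra := PySem.List.pyGetD coins a 0 + min inner (bGet dp (a + 2) b)
  let rb := PySem.List.pyGetD coins b 0 + min inner (bGet dp a (b - 2))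
  tSet dp a b (max ra rb)

def bRow (coins : List Int) (n L : Int) (dp : List (List Int)) : List (List Int) :=
  (PySem.List.pyRange 0 (n - L) 1).foldl (bStep coins L) dp

def maximum_revenue_alt (coins : List Int) : Int :=
  let n := PySem.List.len coins
  if n = 0 then 0
  else
    let dp0 := (PySem.List.pyRange 0 n 1).map (fun _ => List.replicate n.toNat 0)
    let dpF := (PySem.List.pyRange 0 n 1).foldl (fun dp L => bRow coins n L dp) dp0
    tGet dpF 0 (n - 1)

-- ===== PRECONDITION & SPEC =====
def Spec_maximum_revenue (coins : List Int) (out : Int) : Prop := out = maximum_revenue_alt coins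
instance (coins : List Int) (out : Int) : Decidable (Spec_maximum_revenue coins out) := by unfold Spec_maximum_revenue; infer_instance

-- ===== CLAIM (what is proved, stated in full; the proofs are below) =====
def Claim_equal_maximum_revenue : Prop := ∀ (coins : List Int), Dom_maximum_revenue coins → Spec_maximum_revenue coins (maximum_revenue coins)

-- ===== LEMMAS AND PROOFS =====

-- The pure game-value recurrence both programs compute.
def pvG (coins : List Int) (a b : Int) : Int :=
  if a > b then 0
  else max (PySem.List.pyGetD coins a 0 + min (pvG coins (a + 1) (b - 1)) (pvG coins (a + 2) b))
           (PySem.List.pyGetD coins b 0 + min (pvG coins (a + 1) (b - 1)) (pvG coins a (b - 2)))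
termination_by (b - a + 2).toNat
decreasing_by all_goals omega

lemma pvG_base (coins : List Int) {a b : Int} (h : a > b) : pvG coins a b = 0 := by
  rw [pvG]; simp [h]

lemma pvG_rec (coins : List Int) {a b : Int} (h : ¬ a > b) :
    pvG coins a b =
      max (PySem.List.pyGetD coins a 0 + min (pvG coins (a + 1) (b - 1)) (pvG coins (a + 2) b))
          (PySem.List.pyGetD coins b 0 + min (pvG coins (a + 1) (b - 1)) (pvG coins a (b - 2))) := by
  rw [pvG]; simp [h]

-- -------- table lemmas --------
def TShape (N : Nat) (t : List (List Int)) : Prop :=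
  t.length = N ∧ ∀ r ∈ t, r.length = N

lemma tGet_nonneg (t : List (List Int)) {x y : Int} (hx : 0 ≤ x) (hy : 0 ≤ y) :
    tGet t x y = ((t[x.toNat]?.getD [])[y.toNat]?).getD 0 := by
  simp [tGet, PySem.List.pyGetD, PySem.List.pyGet?_of_nonneg _ hx, PySem.List.pyGet?_of_nonneg _ hy]

lemma tSet_nonneg (t : List (List Int)) {x y : Int} (v : Int) (hx : 0 ≤ x) (hy : 0 ≤ y) :
    tSet t x y v = t.set x.toNat ((t[x.toNat]?.getD []).set y.toNat v) := by
  simp [tSet, PySem.List.pySetD_of_nonneg _ _ hx, PySem.List.pySetD_of_nonneg _ _ hy,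
    PySem.List.pyGetD, PySem.List.pyGet?_of_nonneg _ hx]

lemma tSet_shape {N : Nat} {t : List (List Int)} (hsh : TShape N t) {x y : Int} (v : Int)
    (hx : 0 ≤ x) (hy : 0 ≤ y) : TShape N (tSet t x y v) := by
  rw [tSet_nonneg t v hx hy]
  by_cases hlt : x.toNat < t.length
  · refine ⟨by simp [hsh.1], ?_⟩
    intro r hr
    rcases List.mem_or_eq_of_mem_set hr with h | h
    · exact hsh.2 r h
    · subst h
      rw [List.length_set, List.getElem?_eq_getElem hlt]
      exact hsh.2 _ (List.getElem_mem hlt)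
  · rw [List.set_eq_of_length_le (by omega)]
    exact hsh

lemma tGet_tSet_self {N : Nat} {t : List (List Int)} (hsh : TShape N t) {x y : Int} (v : Int)
    (hx0 : 0 ≤ x) (hxn : x < (N : Int)) (hy0 : 0 ≤ y) (hyn : y < (N : Int)) :
    tGet (tSet t x y v) x y = v := by
  have hxl : x.toNat < t.length := by have := hsh.1; omega
  have hyl : y.toNat < (t[x.toNat]).length := by
    have := hsh.2 _ (List.getElem_mem hxl); omega
  rw [tSet_nonneg t v hx0 hy0, tGet_nonneg _ hx0 hy0]
  rw [List.getElem?_set_self']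
  simp [List.getElem?_eq_getElem hxl, List.getElem?_set_self', List.getElem?_eq_getElem hyl]

lemma tGet_tSet_ne {t : List (List Int)} {x y x' y' : Int} (v : Int)
    (hx0 : 0 ≤ x) (hy0 : 0 ≤ y)
    (hx0' : 0 ≤ x') (hy0' : 0 ≤ y') (hne : ¬ (x' = x ∧ y' = y)) :
    tGet (tSet t x y v) x' y' = tGet t x' y' := by
  rw [tSet_nonneg t v hx0 hy0, tGet_nonneg _ hx0' hy0', tGet_nonneg _ hx0' hy0']
  by_cases hxx : x' = x
  · subst hxx
    have hyy : y'.toNat ≠ y.toNat := by omega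
    by_cases hlt : x'.toNat < t.length
    · rw [List.getElem?_set_self', List.getElem?_eq_getElem hlt]
      simp [List.getElem?_set_ne hyy.symm]
    · rw [List.set_eq_of_length_le (by omega)]
  · have hxx' : x.toNat ≠ x'.toNat := by omega
    rw [List.getElem?_set_ne hxx']

lemma tGet_zero {t : List (List Int)} (hz : ∀ r ∈ t, ∀ z ∈ r, z = (0 : Int)) (x y : Int) :
    tGet t x y = 0 := by
  unfold tGet
  cases hrow : PySem.List.pyGet? t x with
  | none =>
    have h1 : PySem.List.pyGetD t x ([] : List Int) = [] := by
      simp [PySem.List.pyGetD, hrow]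
    rw [h1]
    simp [PySem.List.pyGetD, PySem.List.pyGet?, PySem.List.pyIdx?]
  | some row =>
    have hrm := PySem.List.mem_of_pyGet?_eq_some t hrow
    have h1 : PySem.List.pyGetD t x ([] : List Int) = row := by
      simp [PySem.List.pyGetD, hrow]
    rw [h1]
    cases hrv : PySem.List.pyGet? row y with
    | none => simp [PySem.List.pyGetD, hrv]
    | some z =>
      have hzz := hz row hrm z (PySem.List.mem_of_pyGet?_eq_some row hrv)
      simp [PySem.List.pyGetD, hrv, hzz]

-- -------- A side: the memo only caches pvG values (0 is the "empty" sentinel) --------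
def MemoOK (coins : List Int) (m : List (List Int)) : Prop :=
  ∀ x y, 0 ≤ x → x ≤ y → y < (coins.length : Int) → tGet m x y ≠ 0 → tGet m x y = pvG coins x y

lemma fA_correct (coins : List Int) :
    ∀ (k : Nat) (a b : Int) (m : List (List Int)), (b - a + 2).toNat ≤ k →
      0 ≤ a → b < (coins.length : Int) → TShape coins.length m → MemoOK coins m →
      (fA coins k a b m).1 = pvG coins a b ∧ TShape coins.length (fA coins k a b m).2 ∧
        MemoOK coins (fA coins k a b m).2 := by
  intro k
  induction k with
  | zero =>
    intro a b m hk ha hb hsh hm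
    have hab : a > b := by omega
    simp only [fA]
    exact ⟨(pvG_base coins hab).symm, hsh, hm⟩
  | succ k ih =>
    intro a b m hk ha hb hsh hm
    by_cases hab : a > b
    · simp only [fA, if_pos hab]
      exact ⟨(pvG_base coins hab).symm, hsh, hm⟩
    · by_cases hmz : tGet m a b = 0
      · have h1 := ih (a + 1) (b - 1) m (by omega) (by omega) (by omega) hsh hm
        have h2 := ih (a + 2) b _ (by omega) (by omega) (by omega) h1.2.1 h1.2.2
        have h3 := ih (a + 1) (b - 1) _ (by omega) (by omega) (by omega) h2.2.1 h2.2.2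
        have h4 := ih a (b - 2) _ (by omega) (by omega) (by omega) h3.2.1 h3.2.2
        simp only [fA, if_neg hab, if_pos hmz]
        rw [h1.1, h2.1, h3.1, h4.1, ← pvG_rec coins hab]
        refine ⟨rfl, tSet_shape h4.2.1 _ ha (by omega), ?_⟩
        intro x y hx hxy hy hne
        by_cases hxy2 : x = a ∧ y = b
        · rw [hxy2.1, hxy2.2]
          rw [tGet_tSet_self h4.2.1 _ ha (by omega) (by omega) hb]
        · rw [tGet_tSet_ne _ ha (by omega) hx (by omega) hxy2] at hne ⊢
          exact h4.2.2 x y hx hxy hy hne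
      · simp only [fA, if_neg hab, if_neg hmz]
        exact ⟨hm a b ha (by omega) hb hmz, hsh, hm⟩

lemma maximum_revenue_eq_pvG (coins : List Int) :
    maximum_revenue coins = pvG coins 0 ((coins.length : Int) - 1) := by
  unfold maximum_revenue
  have hinit_sh : TShape coins.length (coins.map (fun _ => List.replicate (PySem.List.len coins).toNat 0)) := by
    constructor
    · simp
    · intro r hr
      simp only [List.mem_map] at hr
      obtain ⟨_, _, rfl⟩ := hr
      simp [PySem.List.len_eq]
  have hinit_ok : MemoOK coins (coins.map (fun _ => List.replicate (PySem.List.len coins).toNat 0)) := by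
    intro x y _ _ _ hne
    exfalso; apply hne
    apply tGet_zero
    intro r hr z hz
    simp only [List.mem_map] at hr
    obtain ⟨_, _, rfl⟩ := hr
    exact (List.eq_of_mem_replicate hz)
  have h := fA_correct coins (PySem.List.len coins + 1).toNat 0 (PySem.List.len coins - 1)
    _ (by simp only [PySem.List.len_eq]; omega) (by omega)
    (by simp only [PySem.List.len_eq]; omega) hinit_sh hinit_ok
  rw [h.1]
  simp [PySem.List.len_eq]

-- -------- B side: the table is pvG on all processed intervals --------
lemma bGet_eq_pvG {coins : List Int} {L : Int} {dp : List (List Int)}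
    (hinv : ∀ x y, 0 ≤ x → x ≤ y → y < (coins.length : Int) → y - x < L → tGet dp x y = pvG coins x y)
    {x y : Int} (hx : 0 ≤ x) (hy : y < (coins.length : Int)) (hgap : y - x < L) :
    bGet dp x y = pvG coins x y := by
  unfold bGet
  by_cases hle : x ≤ y
  · simp only [if_pos hle]; exact hinv x y hx hle hy hgap
  · simp only [if_neg hle]
    exact (pvG_base coins (by omega)).symm

lemma bStep_shape {coins : List Int} {L : Int} {dp : List (List Int)} {a : Int}
    (hsh : TShape coins.length dp) (ha : 0 ≤ a) (hL : 0 ≤ L) :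
    TShape coins.length (bStep coins L dp a) := by
  unfold bStep
  exact tSet_shape hsh _ ha (by omega)

lemma foldl_bStep_shape {coins : List Int} {L : Int} (hL : 0 ≤ L) :
    ∀ (l : List Int) (dp : List (List Int)), (∀ a ∈ l, 0 ≤ a) → TShape coins.length dp →
      TShape coins.length (l.foldl (bStep coins L) dp) := by
  intro l
  induction l with
  | nil => intro dp _ hsh; exact hsh
  | cons a l ihl =>
    intro dp hpos hsh
    simp only [List.foldl_cons]
    exact ihl _ (fun x hx => hpos x (List.mem_cons_of_mem a hx))
      (bStep_shape hsh (hpos a List.mem_cons_self) hL)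

lemma pos_of_mem_pyRange {X a : Int} (h : a ∈ PySem.List.pyRange 0 X 1) : 0 ≤ a := by
  have := (PySem.List.mem_pyRange_one).1 h
  omega

lemma bRow_inv (coins : List Int) (L : Int) (hL : 0 ≤ L) :
    ∀ (m : Nat) (dp : List (List Int)), TShape coins.length dp →
      (∀ x y, 0 ≤ x → x ≤ y → y < (coins.length : Int) → y - x < L → tGet dp x y = pvG coins x y) →
      (m : Int) ≤ (coins.length : Int) - L →
      ∀ x y, 0 ≤ x → x ≤ y → y < (coins.length : Int) →
        (y - x < L ∨ (y - x = L ∧ x < (m : Int))) →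
        tGet ((PySem.List.pyRange 0 (m : Int) 1).foldl (bStep coins L) dp) x y = pvG coins x y := by
  intro m
  induction m with
  | zero =>
    intro dp _ hdp _ x y hx hxy hy hcase
    simp only [Nat.cast_zero] at hcase ⊢
    rcases hcase with h | h
    · simpa [PySem.List.pyRange] using hdp x y hx hxy hy h
    · omega
  | succ m ih =>
    intro dp hsh hdp hm x y hx hxy hy hcase
    have hsplit : PySem.List.pyRange 0 ((m : Int) + 1) 1 = PySem.List.pyRange 0 (m : Int) 1 ++ [(m : Int)] :=
      PySem.List.pyRange_one_succ_right (by omega)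
    have hcast : ((m + 1 : Nat) : Int) = (m : Int) + 1 := by push_cast; ring
    rw [hcast, hsplit, List.foldl_append]
    set dpm := (PySem.List.pyRange 0 (m : Int) 1).foldl (bStep coins L) dp with hdpm
    have hshm : TShape coins.length dpm :=
      foldl_bStep_shape hL _ dp (fun a ha => pos_of_mem_pyRange ha) hsh
    have hdpmMem : ∀ x y, 0 ≤ x → x ≤ y → y < (coins.length : Int) →
        (y - x < L ∨ (y - x = L ∧ x < (m : Int))) → tGet dpm x y = pvG coins x y :=
      fun x y hx hxy hy hc => ih dp hsh hdp (by omega) x y hx hxy hy hc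
    have hdpmLt : ∀ x y, 0 ≤ x → x ≤ y → y < (coins.length : Int) → y - x < L →
        tGet dpm x y = pvG coins x y :=
      fun x y hx hxy hy hc => hdpmMem x y hx hxy hy (Or.inl hc)
    simp only [List.foldl_cons, List.foldl_nil, bStep]
    have hbn : (m : Int) + L < (coins.length : Int) := by omega
    have hnab : ¬ ((m : Int) > (m : Int) + L) := by omega
    have g1 : bGet dpm ((m : Int) + 1) ((m : Int) + L - 1) = pvG coins ((m : Int) + 1) ((m : Int) + L - 1) :=
      bGet_eq_pvG hdpmLt (by omega) (by omega) (by omega)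
    have g2 : bGet dpm ((m : Int) + 2) ((m : Int) + L) = pvG coins ((m : Int) + 2) ((m : Int) + L) :=
      bGet_eq_pvG hdpmLt (by omega) (by omega) (by omega)
    have g3 : bGet dpm (m : Int) ((m : Int) + L - 2) = pvG coins (m : Int) ((m : Int) + L - 2) :=
      bGet_eq_pvG hdpmLt (by omega) (by omega) (by omega)
    rw [g1, g2, g3, ← pvG_rec coins hnab]
    by_cases hxy2 : x = (m : Int) ∧ y = (m : Int) + L
    · rw [hxy2.1, hxy2.2]
      rw [tGet_tSet_self hshm _ (by omega) (by omega) (by omega) (by omega)]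
    · rw [tGet_tSet_ne _ (by omega) (by omega) hx (by omega) hxy2]
      apply hdpmMem x y hx hxy hy
      rcases hcase with h | h
      · exact Or.inl h
      · rcases lt_or_ge x (m : Int) with hlt | hge
        · exact Or.inr ⟨h.1, hlt⟩
        · exfalso; exact hxy2 ⟨by omega, by omega⟩

lemma foldl_bRow_shape (coins : List Int) (n : Int) :
    ∀ (l : List Int) (dp : List (List Int)), (∀ L ∈ l, 0 ≤ L) → TShape coins.length dp →
      TShape coins.length (l.foldl (fun dp L => bRow coins n L dp) dp) := by
  intro l
  induction l with
  | nil => intro dp _ hsh; exact hsh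
  | cons L l ihl =>
    intro dp hpos hsh
    simp only [List.foldl_cons]
    apply ihl _ (fun x hx => hpos x (List.mem_cons_of_mem L hx))
    unfold bRow
    exact foldl_bStep_shape (hpos L List.mem_cons_self) _ dp
      (fun a ha => pos_of_mem_pyRange ha) hsh

lemma bOuter_inv (coins : List Int) :
    ∀ (m : Nat) (dp0 : List (List Int)), TShape coins.length dp0 →
      (m : Int) ≤ (coins.length : Int) →
      ∀ x y, 0 ≤ x → x ≤ y → y < (coins.length : Int) → y - x < (m : Int) →
        tGet ((PySem.List.pyRange 0 (m : Int) 1).foldl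
          (fun dp L => bRow coins (coins.length : Int) L dp) dp0) x y = pvG coins x y := by
  intro m
  induction m with
  | zero => intro dp0 _ _ x y hx hxy hy hgap; simp only [Nat.cast_zero] at hgap; omega
  | succ m ih =>
    intro dp0 hsh hm x y hx hxy hy hgap
    have hsplit : PySem.List.pyRange 0 ((m : Int) + 1) 1 = PySem.List.pyRange 0 (m : Int) 1 ++ [(m : Int)] :=
      PySem.List.pyRange_one_succ_right (by omega)
    have hcast : ((m + 1 : Nat) : Int) = (m : Int) + 1 := by push_cast; ring
    rw [hcast, hsplit, List.foldl_append]
    simp only [List.foldl_cons, List.foldl_nil]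
    set dpm := (PySem.List.pyRange 0 (m : Int) 1).foldl
      (fun dp L => bRow coins (coins.length : Int) L dp) dp0 with hdpm
    have hshm : TShape coins.length dpm :=
      foldl_bRow_shape coins _ _ dp0 (fun a ha => pos_of_mem_pyRange ha) hsh
    have hdpmOK : ∀ x y, 0 ≤ x → x ≤ y → y < (coins.length : Int) → y - x < (m : Int) →
        tGet dpm x y = pvG coins x y :=
      fun x y hx hxy hy hc => ih dp0 hsh (by omega) x y hx hxy hy hc
    unfold bRow
    have hrange : PySem.List.pyRange 0 ((coins.length : Int) - (m : Int)) 1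
        = PySem.List.pyRange 0 ((((coins.length : Int) - (m : Int)).toNat : Nat) : Int) 1 := by
      congr 1
      omega
    rw [hrange]
    apply bRow_inv coins (m : Int) (by omega) ((coins.length : Int) - (m : Int)).toNat dpm hshm
      hdpmOK (by omega) x y hx hxy hy
    rcases lt_or_ge (y - x) (m : Int) with h | h
    · exact Or.inl h
    · exact Or.inr ⟨by omega, by omega⟩

lemma maximum_revenue_alt_eq_pvG (coins : List Int) :
    maximum_revenue_alt coins = pvG coins 0 ((coins.length : Int) - 1) := by
  unfold maximum_revenue_alt
  simp only [PySem.List.len_eq]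
  by_cases hn : coins.length = 0
  · rw [hn]
    simp only [Nat.cast_zero]
    exact (pvG_base coins (by omega)).symm
  · rw [if_neg (by exact_mod_cast hn)]
    have hsh0 : TShape coins.length
        ((PySem.List.pyRange 0 (coins.length : Int) 1).map
          (fun _ => List.replicate ((coins.length : Int)).toNat 0)) := by
      constructor
      · simp [PySem.List.pyRange_zero_natCast]
      · intro r hr
        simp only [List.mem_map] at hr
        obtain ⟨_, _, rfl⟩ := hr
        simp
    have := bOuter_inv coins coins.length _ hsh0 (by omega)
      0 ((coins.length : Int) - 1) (by omega) (by omega) (by omega) (by omega)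
    exact this

-- ===== VERDICT (by name: the statement is the Claim_ definition above) =====
theorem maximum_revenue_spec : Claim_equal_maximum_revenue := by
  intro coins _
  unfold Spec_maximum_revenue
  rw [maximum_revenue_eq_pvG, maximum_revenue_alt_eq_pvG]
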